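-- pv_equiv track=rewrite | github.com/apostolovbg/devcovenant | devcovenant/core/install.py | _remove_legacy_policy_control_keys
-- ===== SOURCE A (Python) =====
-- def _remove_legacy_policy_control_keys(text: str) -> tuple[str, bool]:
--     """Remove legacy activation keys from config.yaml text."""
--     legacy_keys = {"autogen_disable:", "manual_force_enable:"}
--     lines = text.splitlines()
--     updated_lines: list[str] = []
--     removed = False
--     index = 0
--     while index < len(lines):
--         line = lines[index]
--         stripped = line.strip()
--         if any(stripped.startswith(key) for key in legacy_keys):
--             removed = True
--             index += 1
--             while index < len(lines):
--                 next_line = lines[index]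
--                 if next_line.startswith("  -") or not next_line.strip():
--                     index += 1
--                     continue
--                 break
--             continue
--         updated_lines.append(line)
--         index += 1
--     updated = "\n".join(updated_lines).rstrip() + "\n"
--     return updated, removed
-- ===== SOURCE B (Python) =====
-- def _remove_legacy_policy_control_keys(text: str) -> tuple[str, bool]:
--     """Remove legacy activation keys from config.yaml text (flat one-state-flag loop)."""
--     legacy_keys = ("autogen_disable:", "manual_force_enable:")
--     kept = []
--     removed = False
--     skipping = False
--     for line in text.splitlines():
--         if skipping and (line.startswith("  -") or not line.strip()):
--             continue
--         skipping = False
--         if line.strip().startswith(legacy_keys):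
--             removed = True
--             skipping = True
--         else:
--             kept.append(line)
--     return "\n".join(kept).rstrip() + "\n", removed
-- ===== Notes on version B (the rewrite author's own statement) =====
-- stated objective: simpler
-- what changed: Replaced the index-driven outer while with a nested inner skip-ahead while by a single flat for-loop over the lines maintaining one boolean skip-state flag.
import Mathlib
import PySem

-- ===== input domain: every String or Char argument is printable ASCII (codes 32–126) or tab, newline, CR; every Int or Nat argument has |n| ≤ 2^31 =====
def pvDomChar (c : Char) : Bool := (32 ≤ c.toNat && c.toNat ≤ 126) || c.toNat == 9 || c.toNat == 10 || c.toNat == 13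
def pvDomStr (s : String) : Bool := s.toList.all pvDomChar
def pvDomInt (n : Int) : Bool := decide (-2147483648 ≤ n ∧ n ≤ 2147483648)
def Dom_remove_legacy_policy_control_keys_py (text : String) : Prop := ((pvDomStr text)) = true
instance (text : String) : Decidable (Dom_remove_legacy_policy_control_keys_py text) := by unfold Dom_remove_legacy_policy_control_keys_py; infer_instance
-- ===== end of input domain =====

-- B replaces A's nested skip-ahead inner while by a flat single loop with a boolean `skipping` state (objective: simpler).

-- ===== PORT A =====
-- any(stripped.startswith(key) for key in legacy_keys): an 'or' over the two-element set (order irrelevant for a disjunction)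
def pvIsLegacyKey (stripped : String) : Bool :=
  PySem.Str.startswith stripped "autogen_disable:" || PySem.Str.startswith stripped "manual_force_enable:"

-- the inner 'while index < len(lines): … continue / break' loop: advances past "  -"/blank lines
def pvSkipA : List String → List String
  | [] => []
  | next_line :: rest =>
    if PySem.Str.startswith next_line "  -" || PySem.Str.strip next_line == "" then
      pvSkipA rest
    else
      next_line :: rest

theorem pvSkipA_length_le (ls : List String) : (pvSkipA ls).length ≤ ls.length := by
  induction ls with
  | nil => simp [pvSkipA]
  | cons l rest ih =>
    simp only [pvSkipA]
    split
    · exact Nat.le_trans ih (Nat.le_succ _)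
    · simp

-- the outer 'while index < len(lines)' loop, recursion on the remaining lines
def pvLoopA : List String → List String × Bool
  | [] => ([], false)
  | line :: rest =>
    if pvIsLegacyKey (PySem.Str.strip line) then
      ((pvLoopA (pvSkipA rest)).1, true)
    else
      let p := pvLoopA rest
      (line :: p.1, p.2)
termination_by ls => ls.length
decreasing_by
  · exact Nat.lt_succ_of_le (pvSkipA_length_le rest)
  · simp

def remove_legacy_policy_control_keys_py (text : String) : String × Bool :=
  let lines := PySem.Str.splitlines text
  let p := pvLoopA lines
  (PySem.Str.rstrip (PySem.Str.join "\n" p.1) ++ "\n", p.2)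

-- ===== PORT B =====
-- state: (kept, removed, skipping); one step of the flat for-loop
def pvStepB (st : List String × Bool × Bool) (line : String) : List String × Bool × Bool :=
  if st.2.2 && (PySem.Str.startswith line "  -" || PySem.Str.strip line == "") then
    st
  else if PySem.Str.startswith (PySem.Str.strip line) "autogen_disable:"
          || PySem.Str.startswith (PySem.Str.strip line) "manual_force_enable:" then
    (st.1, true, true)
  else
    (st.1 ++ [line], st.2.1, false)

def remove_legacy_policy_control_keys_py_alt (text : String) : String × Bool :=
  let st := (PySem.Str.splitlines text).foldl pvStepB ([], false, false)
  (PySem.Str.rstrip (PySem.Str.join "\n" st.1) ++ "\n", st.2.1)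

-- ===== PRECONDITION & SPEC =====
def Spec_remove_legacy_policy_control_keys_py (text : String) (out : String × Bool) : Prop := out = remove_legacy_policy_control_keys_py_alt text
instance (text : String) (out : String × Bool) : Decidable (Spec_remove_legacy_policy_control_keys_py text out) := by unfold Spec_remove_legacy_policy_control_keys_py; infer_instance

-- ===== CLAIM (what is proved, stated in full; the proofs are below) =====
def Claim_equal_remove_legacy_policy_control_keys_py : Prop := ∀ (text : String), Dom_remove_legacy_policy_control_keys_py text → Spec_remove_legacy_policy_control_keys_py text (remove_legacy_policy_control_keys_py text)

-- ===== LEMMAS AND PROOFS =====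

-- while skipping, B's fold ignores exactly the lines A's inner while skips (in the kept/removed components)
theorem pvFold_skip (ls : List String) (kept : List String) :
    (ls.foldl pvStepB (kept, true, true)).1 = ((pvSkipA ls).foldl pvStepB (kept, true, false)).1
      ∧ (ls.foldl pvStepB (kept, true, true)).2.1
          = ((pvSkipA ls).foldl pvStepB (kept, true, false)).2.1 := by
  induction ls generalizing kept with
  | nil => simp [pvSkipA]
  | cons l rest ih =>
    by_cases h : (PySem.Str.startswith l "  -" || PySem.Str.strip l == "") = true
    · have hstep : pvStepB (kept, true, true) l = (kept, true, true) := by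
        simp only [pvStepB]; rw [h]; simp
      simp only [pvSkipA, h, if_pos, List.foldl_cons, hstep]
      exact ih kept
    · have h' : (PySem.Str.startswith l "  -" || PySem.Str.strip l == "") = false := by
        simpa using h
      have hstep : pvStepB (kept, true, true) l = pvStepB (kept, true, false) l := by
        simp only [pvStepB]; rw [h']; simp
      simp only [pvSkipA, h', List.foldl_cons, hstep, Bool.false_eq_true, if_false]
      constructor <;> trivial

-- main invariant: B's flat fold from a non-skipping state computes A's outer loop
theorem pvFold_main (ls : List String) (kept : List String) (removed : Bool) :
    (ls.foldl pvStepB (kept, removed, false)).1 = kept ++ (pvLoopA ls).1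
      ∧ (ls.foldl pvStepB (kept, removed, false)).2.1 = (removed || (pvLoopA ls).2) := by
  induction hn : ls.length using Nat.strong_induction_on generalizing ls kept removed with
  | _ n ih =>
    match ls, hn with
    | [], _ => simp [pvLoopA]
    | line :: rest, hn =>
      have hrest : rest.length + 1 = n := by simpa using hn
      by_cases hk : (PySem.Str.startswith (PySem.Str.strip line) "autogen_disable:"
          || PySem.Str.startswith (PySem.Str.strip line) "manual_force_enable:") = true
      · have hstep : pvStepB (kept, removed, false) line = (kept, true, true) := by
          simp only [pvStepB]; rw [hk]; simp
        have hkey : pvIsLegacyKey (PySem.Str.strip line) = true := hk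
        have hlt : (pvSkipA rest).length < n := by
          have := pvSkipA_length_le rest; omega
        have hih := ih _ hlt (pvSkipA rest) kept true rfl
        simp only [List.foldl_cons, hstep, pvLoopA, hkey, if_pos]
        refine ⟨?_, ?_⟩
        · rw [(pvFold_skip rest kept).1, hih.1]
        · rw [(pvFold_skip rest kept).2, hih.2]; simp
      · have hk' : PySem.Str.startswith (PySem.Str.strip line) "autogen_disable:" = false
            ∧ PySem.Str.startswith (PySem.Str.strip line) "manual_force_enable:" = false := by
          simpa using hk
        have hstep : pvStepB (kept, removed, false) line = (kept ++ [line], removed, false) := by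
          simp only [pvStepB]; rw [hk'.1, hk'.2]; simp
        have hkey : pvIsLegacyKey (PySem.Str.strip line) = false := by
          simp only [pvIsLegacyKey]; rw [hk'.1, hk'.2]; rfl
        have hlt : rest.length < n := by omega
        have hih := ih _ hlt rest (kept ++ [line]) removed rfl
        simp only [List.foldl_cons, hstep, pvLoopA, hkey, Bool.false_eq_true, if_false]
        exact ⟨by rw [hih.1]; simp, hih.2⟩

-- ===== VERDICT (by name: the statement is the Claim_ definition above) =====
theorem remove_legacy_policy_control_keys_py_spec : Claim_equal_remove_legacy_policy_control_keys_py := by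
  intro text _
  unfold Spec_remove_legacy_policy_control_keys_py
  unfold remove_legacy_policy_control_keys_py remove_legacy_policy_control_keys_py_alt
  have h := pvFold_main (PySem.Str.splitlines text) [] false
  simp only [List.nil_append, Bool.false_or] at h
  dsimp only
  rw [h.1, h.2]
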